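-- pv_equiv track=rewrite | github.com/37chengshan/scholar-ai | apps/api/app/rag_v3/main_path_service.py | _merge_runtime_modes
-- ===== SOURCE A (Python) =====
-- def _merge_runtime_modes(modes: list[str]) -> str:
--     unique_modes = {mode for mode in modes if mode}
--     if not unique_modes:
--         return "online"
--     if len(unique_modes) == 1:
--         return next(iter(unique_modes))
--     if "shim" in unique_modes:
--         return "mixed"
--     if "lite" in unique_modes:
--         return "mixed"
--     if "local" in unique_modes:
--         return "mixed"
--     return "mixed"
-- ===== SOURCE B (Python) =====
-- def _merge_runtime_modes(modes: list[str]) -> str: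
--     seen = None
--     multiple = False
--     for mode in modes:
--         if not mode:
--             continue
--         if seen is None:
--             seen = mode
--         elif mode != seen:
--             multiple = True
--             break
--     if seen is None:
--         return "online"
--     return "mixed" if multiple else seen
-- ===== Notes on version B (the rewrite author's own statement) =====
-- stated objective: faster
-- what changed: Replaces the set construction and length/membership branching with a single pass that keeps one candidate value and a multiplicity flag, exiting early on the second distinct value.
import Mathlib
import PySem

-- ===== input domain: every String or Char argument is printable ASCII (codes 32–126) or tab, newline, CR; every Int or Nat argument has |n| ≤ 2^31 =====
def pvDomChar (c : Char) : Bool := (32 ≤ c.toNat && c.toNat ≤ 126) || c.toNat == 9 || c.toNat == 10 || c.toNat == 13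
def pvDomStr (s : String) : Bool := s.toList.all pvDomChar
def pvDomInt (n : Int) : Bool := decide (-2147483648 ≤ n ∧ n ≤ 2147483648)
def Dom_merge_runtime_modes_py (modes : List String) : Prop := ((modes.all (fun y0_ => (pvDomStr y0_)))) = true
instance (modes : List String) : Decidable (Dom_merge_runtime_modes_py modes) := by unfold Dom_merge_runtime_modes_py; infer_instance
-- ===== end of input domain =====

-- B replaces A's distinct-set + length/membership branching with one early-terminating
-- pass keeping a single candidate and a multiplicity flag, exiting early on the second distinct value.

-- ===== PORT A =====
def merge_runtime_modes_py (modes : List String) : String :=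
  let unique_modes : PySem.Set String :=
    PySem.Set.ofList (modes.filter (fun mode => !(mode == "")))
  if unique_modes = [] then "online"
  else if PySem.Set.len unique_modes = 1 then unique_modes.headD ""
  else if PySem.Set.contains unique_modes "shim" then "mixed"
  else if PySem.Set.contains unique_modes "lite" then "mixed"
  else if PySem.Set.contains unique_modes "local" then "mixed"
  else "mixed"

-- ===== PORT B =====
-- the for-loop of Source B: state = (seen, multiple); returns at the break point
def mergeLoop : List String → Option String → Option String × Bool
  | [], seen => (seen, false)
  | mode :: rest, seen =>
    if mode == "" then mergeLoop rest seen
    else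
      match seen with
      | none => mergeLoop rest (some mode)
      | some s => if mode == s then mergeLoop rest (some s) else (some s, true)

def merge_runtime_modes_py_alt (modes : List String) : String :=
  match mergeLoop modes none with
  | (none, _) => "online"
  | (some s, multiple) => if multiple then "mixed" else s

-- ===== PRECONDITION & SPEC =====
def Spec_merge_runtime_modes_py (modes : List String) (out : String) : Prop := out = merge_runtime_modes_py_alt modes
instance (modes : List String) (out : String) : Decidable (Spec_merge_runtime_modes_py modes out) := by unfold Spec_merge_runtime_modes_py; infer_instance

-- ===== CLAIM (what is proved, stated in full; the proofs are below) =====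
def Claim_equal_merge_runtime_modes_py : Prop := ∀ (modes : List String), Dom_merge_runtime_modes_py modes → Spec_merge_runtime_modes_py modes (merge_runtime_modes_py modes)

-- ===== LEMMAS AND PROOFS =====

-- the loop ignores empty strings: running it on the filtered list is the same
lemma mergeLoop_filter (modes : List String) (seen : Option String) :
    mergeLoop modes seen = mergeLoop (modes.filter (fun m => !(m == ""))) seen := by
  induction modes generalizing seen with
  | nil => rfl
  | cons m rest ih =>
    by_cases hm : m = ""
    · subst hm; simpa [mergeLoop] using ih seen
    · have hm' : (m == "") = false := beq_eq_false_iff_ne.mpr hm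
      rw [List.filter_cons_of_pos (by simp [hm'])]
      cases seen with
      | none => simp only [mergeLoop, hm']; exact ih (some m)
      | some s =>
        by_cases hms : m = s
        · subst hms
          simp only [mergeLoop, hm', beq_self_eq_true, if_true]
          split <;> exact ih (some m)
        · have hms' : (m == s) = false := beq_eq_false_iff_ne.mpr hms
          simp [mergeLoop, hm', hms']

-- once a candidate is fixed, the loop's flag is "some later element differs"
lemma mergeLoop_some (rest : List String) (y : String) (h : ∀ m ∈ rest, ¬ m = "") :
    mergeLoop rest (some y) = (some y, !rest.all (fun m => m == y)) := by
  induction rest with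
  | nil => rfl
  | cons m r ih =>
    have hm : ¬ m = "" := h m (List.mem_cons_self ..)
    by_cases hmy : m = y
    · simp [mergeLoop, hmy, ih (fun x hx => h x (List.mem_cons_of_mem _ hx))]
    · simp [mergeLoop, hm, hmy]

-- folding Set.add into a nonempty set keeps its head and nonemptiness
lemma foldl_add_shape (a : String) (t l : List String) :
    ∃ t', List.foldl PySem.Set.add (a :: t) l = a :: t' := by
  induction l generalizing t with
  | nil => exact ⟨t, rfl⟩
  | cons x l ih =>
    simp only [List.foldl_cons, PySem.Set.add]
    by_cases hx : PySem.Set.contains (a :: t) x = true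
    · rw [if_pos hx]; exact ih t
    · rw [if_neg hx]
      simpa using ih (t ++ [x])

-- if every element equals y, the set stays [y]
lemma foldl_add_all_eq (rest : List String) (y : String)
    (h : rest.all (fun m => m == y) = true) :
    List.foldl PySem.Set.add [y] rest = [y] := by
  induction rest with
  | nil => rfl
  | cons m r ih =>
    simp only [List.all_cons, Bool.and_eq_true, beq_iff_eq] at h
    obtain ⟨hm, hr⟩ := h
    subst hm
    simpa [PySem.Set.add, PySem.Set.contains] using ih hr

-- ===== VERDICT (by name: the statement is the Claim_ definition above) =====
theorem merge_runtime_modes_py_spec : Claim_equal_merge_runtime_modes_py := by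
  intro modes _
  show merge_runtime_modes_py modes = merge_runtime_modes_py_alt modes
  unfold merge_runtime_modes_py merge_runtime_modes_py_alt
  rw [mergeLoop_filter modes none]
  set ys := modes.filter (fun m => !(m == "")) with hys
  have hmem : ∀ m ∈ ys, ¬ m = "" := by
    intro m hm
    have := List.of_mem_filter hm
    simpa using this
  match hy : ys with
  | [] => rfl
  | y :: rest =>
    have hrest : ∀ m ∈ rest, ¬ m = "" := fun m hm => hmem m (hy ▸ List.mem_cons_of_mem _ hm)
    have hofl : PySem.Set.ofList (y :: rest) = List.foldl PySem.Set.add [y] rest := by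
      simp [PySem.Set.ofList, PySem.Set.add, PySem.Set.contains]
    obtain ⟨t', ht'⟩ := foldl_add_shape y [] rest
    have hne : PySem.Set.ofList (y :: rest) ≠ [] := by rw [hofl, ht']; simp
    have hy0 : (y == "") = false := beq_eq_false_iff_ne.mpr (hmem y (List.mem_cons_self ..))
    simp only [mergeLoop, hy0, Bool.false_eq_true, if_false]
    rw [mergeLoop_some rest y hrest]
    by_cases hall : rest.all (fun m => m == y) = true
    · -- one distinct value: both return y
      have hone : PySem.Set.ofList (y :: rest) = [y] := by
        rw [hofl, foldl_add_all_eq rest y hall]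
      simp [hone, hall, PySem.Set.len]
    · -- at least two distinct values: both return "mixed"
      have hlen : PySem.Set.len (PySem.Set.ofList (y :: rest)) ≠ 1 := by
        intro hlen1
        apply hall
        rw [List.all_eq_true]
        intro m hm
        have hmem' : m ∈ PySem.Set.ofList (y :: rest) := by
          rw [PySem.Set.mem_ofList]; exact List.mem_cons_of_mem _ hm
        have : PySem.Set.ofList (y :: rest) = [y] := by
          rw [hofl, ht'] at hlen1 ⊢
          simp [PySem.Set.len] at hlen1
          simp [hlen1]
        rw [this] at hmem'
        simpa using hmem'
      have hall' : rest.all (fun m => m == y) = false := by simpa using hall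
      simp only [hall', Bool.not_false, if_neg hne, if_neg hlen]
      split_ifs <;> rfl
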